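-- pv_equiv track=rewrite | github.com/ThallesDaniel/logica_inicial | desafio_2.py | contar_buracos
-- ===== SOURCE A (Python) =====
-- import unicodedata
--
-- def remover_acentos(txt: str) -> str:
--     return ''.join(
--         c for c in unicodedata.normalize('NFD', txt)
--         if unicodedata.category(c) != 'Mn'
--     )
--
-- def contar_buracos(texto: str) -> int:
--     buracos = {
--         'A': 1, 'D': 1, 'O': 1, 'P': 1, 'Q': 1, 'R': 1,
--         'a': 1, 'd': 1, 'o': 1, 'p': 1, 'q': 1, 'e': 1, 'g': 1,
--         'B': 2, 'b': 2
--     }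
--     texto = remover_acentos(texto)  # normaliza antes de contar
--     return sum(buracos.get(letra, 0) for letra in texto)
-- ===== SOURCE B (Python) =====
-- import unicodedata
--
-- def remover_acentos(txt: str) -> str:
--     return ''.join(
--         c for c in unicodedata.normalize('NFD', txt)
--         if unicodedata.category(c) != 'Mn'
--     )
--
-- def contar_buracos(texto: str) -> int:
--     texto = remover_acentos(texto)
--     one_hole = "ADOPQRadopqeg"
--     return sum(texto.count(ch) for ch in one_hole) + 2 * (texto.count('B') + texto.count('b'))
-- ===== Notes on version B (the rewrite author's own statement) =====
-- stated objective: alternative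
-- what changed: Instead of one pass over the text looking each character up in a dict of weights, B iterates over the small hole-letter table, counting each hole letter's occurrences with str.count and summing, with the two-hole letters B/b handled as an explicit doubled term (no dict at all).
import Mathlib
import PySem

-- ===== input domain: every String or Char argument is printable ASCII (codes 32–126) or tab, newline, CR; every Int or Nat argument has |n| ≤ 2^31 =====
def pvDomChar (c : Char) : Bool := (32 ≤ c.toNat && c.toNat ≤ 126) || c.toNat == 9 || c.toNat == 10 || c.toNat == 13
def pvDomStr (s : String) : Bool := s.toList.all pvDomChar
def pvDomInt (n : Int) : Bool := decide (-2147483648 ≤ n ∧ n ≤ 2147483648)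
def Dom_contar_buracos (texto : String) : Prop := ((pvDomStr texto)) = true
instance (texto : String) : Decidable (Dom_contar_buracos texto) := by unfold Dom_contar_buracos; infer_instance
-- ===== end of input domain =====

-- B replaces A's dict-lookup pass over the text with a per-hole-letter count: it sums
-- texto.count(ch) over the 13 one-hole letters and adds a doubled term for 'B'/'b'
-- (alternative decomposition, same linear cost, no dict).


-- ===== PORT A =====
-- the hole table, as the Python dict literal's pair list
def buracosList : List (Char × Int) :=
  [('A',1),('D',1),('O',1),('P',1),('Q',1),('R',1),
   ('a',1),('d',1),('o',1),('p',1),('q',1),('e',1),('g',1),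
   ('B',2),('b',2)]

-- remover_acentos: NFD normalization is the identity and no char has category 'Mn'
-- on the printable-ASCII/tab/newline/CR domain, so this port (exact on Dom) is the identity
def removerAcentos (cs : List Char) : List Char := cs

def contar_buracos (texto : String) : Int :=
  let buracos := PySem.Dict.ofList buracosList
  let t := removerAcentos texto.toList
  t.foldl (fun s letra => s + buracos.getD letra 0) 0

-- ===== PORT B =====
-- the one-hole letters string of Source B
def oneHole : List Char := "ADOPQRadopqeg".toList

-- remover_acentos again; identity on Dom (see above); texto.count(ch) = List.count (exact
-- for single-character needles)
def contar_buracos_alt (texto : String) : Int :=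
  let t := removerAcentos texto.toList
  (oneHole.map (fun ch => (t.count ch : Int))).sum
    + 2 * ((t.count 'B' : Int) + (t.count 'b' : Int))

-- ===== PRECONDITION & SPEC =====
def Spec_contar_buracos (texto : String) (out : Int) : Prop := out = contar_buracos_alt texto
instance (texto : String) (out : Int) : Decidable (Spec_contar_buracos texto out) := by unfold Spec_contar_buracos; infer_instance

-- ===== CLAIM (what is proved, stated in full; the proofs are below) =====
def Claim_equal_contar_buracos : Prop := ∀ (texto : String), Dom_contar_buracos texto → Spec_contar_buracos texto (contar_buracos texto)

-- ===== LEMMAS AND PROOFS =====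

-- one char's table weight, as seen when extending the count sum by one character
lemma buracos_sum_ite (c : Char) :
    (buracosList.map (fun kp => (if kp.1 == c then (1:Int) else 0) * kp.2)).sum
      = (PySem.Dict.ofList buracosList).getD c 0 := by
  by_cases hc : c ∈ buracosList.map Prod.fst
  · simp only [buracosList, List.map_cons, List.map_nil, List.mem_cons,
      List.not_mem_nil, or_false] at hc
    rcases hc with rfl|rfl|rfl|rfl|rfl|rfl|rfl|rfl|rfl|rfl|rfl|rfl|rfl|rfl|rfl <;> rfl
  · have hall : ∀ kp ∈ buracosList, (kp.1 == c) = false := by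
      intro kp hkp
      simp only [beq_eq_false_iff_ne, ne_eq]
      exact fun e => hc (e ▸ List.mem_map_of_mem hkp)
    have hL : (buracosList.map (fun kp => (if kp.1 == c then (1:Int) else 0) * kp.2))
        = buracosList.map (fun _ => (0:Int)) := by
      apply List.map_congr_left
      intro kp hkp
      rw [hall kp hkp]
      simp
    have hitems : (PySem.Dict.ofList buracosList).items = buracosList := by rfl
    have hR : (PySem.Dict.ofList buracosList).getD c 0 = 0 := by
      rcases hget : (PySem.Dict.ofList buracosList).get? c with _ | v
      · simp [PySem.Dict.getD_eq_get?_getD, hget]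
      · exfalso
        have hm := PySem.Dict.mem_items_of_get?_eq_some _ hget
        rw [hitems] at hm
        exact hc (List.mem_map_of_mem hm)
    rw [hL, hR]
    simp

-- the weighted count sum over the table equals A's per-character accumulation
lemma count_sum_eq (l : List Char) :
    (buracosList.map (fun kp => (l.count kp.1 : Int) * kp.2)).sum
      = l.foldl (fun s c => s + (PySem.Dict.ofList buracosList).getD c 0) 0 := by
  induction l using List.reverseRecOn with
  | nil => simp [buracosList]
  | append_singleton l c ih =>
    rw [List.foldl_append, List.foldl_cons, List.foldl_nil]
    rw [← ih]
    have : ∀ kp : Char × Int, ((l ++ [c]).count kp.1 : Int) * kp.2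
        = (l.count kp.1 : Int) * kp.2 + (if kp.1 == c then (1:Int) else 0) * kp.2 := by
      intro kp
      rcases eq_or_ne kp.1 c with h | h
      · subst h; simp [List.count_append]; ring
      · simp only [List.count_append, List.count_singleton, beq_iff_eq]
        have hc : ¬ c = kp.1 := fun e => h e.symm
        simp [hc, h]
    calc (buracosList.map (fun kp => ((l ++ [c]).count kp.1 : Int) * kp.2)).sum
        = (buracosList.map (fun kp => (l.count kp.1 : Int) * kp.2
            + (if kp.1 == c then (1:Int) else 0) * kp.2)).sum := by
          simp only [this]
      _ = (buracosList.map (fun kp => (l.count kp.1 : Int) * kp.2)).sum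
            + (buracosList.map (fun kp => (if kp.1 == c then (1:Int) else 0) * kp.2)).sum := by
          rw [← List.sum_map_add]
      _ = _ := by rw [buracos_sum_ite]

-- B's per-letter decomposition equals the weighted table sum
lemma alt_sum_eq (l : List Char) :
    (oneHole.map (fun ch => (l.count ch : Int))).sum
        + 2 * ((l.count 'B' : Int) + (l.count 'b' : Int))
      = (buracosList.map (fun kp => (l.count kp.1 : Int) * kp.2)).sum := by
  simp only [oneHole, buracosList]
  simp [List.map_cons, List.sum_cons]
  ring

-- ===== VERDICT (by name: the statement is the Claim_ definition above) =====
theorem contar_buracos_spec : Claim_equal_contar_buracos := by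
  intro texto _
  unfold Spec_contar_buracos contar_buracos contar_buracos_alt removerAcentos
  rw [← count_sum_eq, ← alt_sum_eq]
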